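-- pv_equiv track=rewrite | github.com/abhijangda/fastkron | sgkigp/interp/sparse/nbhors.py | _generatedelta
-- ===== SOURCE A (Python) =====
-- def _generatedelta(prefix, d):
--     if d == 0:
--         return prefix
--     allcases = []
--     for i in [-1, 0, 1]:
--         newPrefix = prefix + [i]
--         allcases += _generatedelta(newPrefix, d - 1),
--     if d ==1:
--         return allcases
--     else:
--         return allcases[0] + allcases[1] + allcases[2]
-- ===== SOURCE B (Python) =====
-- import itertools
--
-- def _generatedelta(prefix, d):
--     if d == 0:
--         return prefix
--     return [prefix + list(combo) for combo in itertools.product([-1, 0, 1], repeat=d)]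
-- ===== Notes on version B (the rewrite author's own statement) =====
-- stated objective: idiomatic
-- what changed: Replaces the hand-rolled recursion with branch-on-d==1 and manual list concatenation by a single itertools.product([-1,0,1], repeat=d) comprehension yielding the same lexicographic enumeration.
-- outside the precondition, e.g. on _generatedelta([1], 0): A returns [1], B returns [1]
import Mathlib
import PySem

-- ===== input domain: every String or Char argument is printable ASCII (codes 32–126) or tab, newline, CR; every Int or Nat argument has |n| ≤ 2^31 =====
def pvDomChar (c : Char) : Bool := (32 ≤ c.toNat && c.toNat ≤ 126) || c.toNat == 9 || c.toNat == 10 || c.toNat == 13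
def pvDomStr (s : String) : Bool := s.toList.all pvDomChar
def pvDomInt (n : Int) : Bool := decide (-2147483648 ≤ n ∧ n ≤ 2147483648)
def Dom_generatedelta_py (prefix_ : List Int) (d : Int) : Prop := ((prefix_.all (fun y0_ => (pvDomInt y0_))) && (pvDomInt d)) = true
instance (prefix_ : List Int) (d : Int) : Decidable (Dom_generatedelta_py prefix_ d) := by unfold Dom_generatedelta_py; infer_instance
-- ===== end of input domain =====

-- B replaces A's recursion (with its d==1 special branch) by an itertools.product
-- comprehension over {-1,0,1}^d; objective: idiomatic, same lexicographic output.


-- ===== PORT A =====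
-- A's recursion on d, as fuel on d.toNat (Pre_ gives d ≥ 1, so toNat is exact).
-- At the d == 0 leaf Python returns the flat `prefix` itself, which has no value of
-- the declared List (List Int) type; the leaf is represented wrapped as [prefix]
-- (d = 0 lies outside Pre_; inside Pre_ the leaf is only reached as an ELEMENT of the
-- d == 1 level's `allcases`, where the wrapping makes A's `if d == 1: return allcases`
-- branch coincide with the `allcases[0] + allcases[1] + allcases[2]` branch, so the
-- loop-with-concatenation below is A's computation for every d ≥ 1).
def generatedelta_pyGo (prefix_ : List Int) : Nat → List (List Int)
  | 0 => [prefix_]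
  | n + 1 =>
    -- for i in [-1, 0, 1]: allcases += _generatedelta(prefix + [i], d-1), ; then concatenated
    ([-1, 0, 1] : List Int).foldl
      (fun allcases i => allcases ++ generatedelta_pyGo (prefix_ ++ [i]) n) []

def generatedelta_py (prefix_ : List Int) (d : Int) : List (List Int) :=
  generatedelta_pyGo prefix_ d.toNat

-- ===== PORT B =====
-- itertools.product([-1,0,1], repeat=d): lexicographic, first coordinate slowest.
def pvProduct3 : Nat → List (List Int)
  | 0 => [[]]
  | n + 1 => ([-1, 0, 1] : List Int).flatMap (fun i => (pvProduct3 n).map (fun c => i :: c))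

def generatedelta_py_alt (prefix_ : List Int) (d : Int) : List (List Int) :=
  if d = 0 then [prefix_]  -- Source B's d == 0 guard returns the flat prefix; wrapped (outside Pre_)
  else (pvProduct3 d.toNat).map (fun combo => prefix_ ++ combo)

-- ===== PRECONDITION & SPEC =====
-- Pre_ excludes d ≤ 0: for d < 0 Python A recurses forever (RecursionError), and for
-- d == 0 A returns the flat prefix itself, which is not a value of the declared
-- list-of-vectors type List[List[int]] (B's Python returns the same flat value there).
def Pre_generatedelta_py (prefix_ : List Int) (d : Int) : Prop := 1 ≤ d
instance (prefix_ : List Int) (d : Int) : Decidable (Pre_generatedelta_py prefix_ d) := by unfold Pre_generatedelta_py; infer_instance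
def pvWitness_generatedelta_py : List Int × Int := ([2], 2)
def Spec_generatedelta_py (prefix_ : List Int) (d : Int) (out : List (List Int)) : Prop := out = generatedelta_py_alt prefix_ d
instance (prefix_ : List Int) (d : Int) (out : List (List Int)) : Decidable (Spec_generatedelta_py prefix_ d out) := by unfold Spec_generatedelta_py; infer_instance

-- ===== CLAIM (what is proved, stated in full; the proofs are below) =====
def Claim_equal_generatedelta_py : Prop := ∀ (prefix_ : List Int) (d : Int), Dom_generatedelta_py prefix_ d → Pre_generatedelta_py prefix_ d → Spec_generatedelta_py prefix_ d (generatedelta_py prefix_ d)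

-- ===== LEMMAS AND PROOFS =====
lemma generatedelta_pyGo_eq (n : Nat) :
    ∀ (p : List Int), generatedelta_pyGo p n = (pvProduct3 n).map (fun c => p ++ c) := by
  induction n with
  | zero => intro p; simp [generatedelta_pyGo, pvProduct3]
  | succ n ih =>
    intro p
    simp [generatedelta_pyGo, pvProduct3, List.foldl, ih, List.map_map,
      Function.comp_def, List.append_assoc]

-- ===== VERDICT (by name: the statement is the Claim_ definition above) =====
theorem generatedelta_py_spec : Claim_equal_generatedelta_py := by
  intro p d _ hpre
  unfold Spec_generatedelta_py generatedelta_py generatedelta_py_alt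
  have hd : d ≠ 0 := by unfold Pre_generatedelta_py at hpre; omega
  rw [if_neg hd, generatedelta_pyGo_eq]
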